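-- pv_equiv track=rewrite | github.com/zachmcd09/mlx-audio-ui | debug_encodec_params.py | find_potential_mappings
-- ===== SOURCE A (Python) =====
-- from typing import Dict, Any, Set, List, Tuple
--
-- def find_potential_mappings(param_names: Set[str], weight_names: Set[str]) -> Dict[str, List[str]]:
--     """
--     Find potential mappings between parameter names and weight names.
--
--     This uses heuristics to suggest possible mappings between differently named parameters.
--
--     Returns:
--         A dictionary mapping expected parameter names to possible weight names
--     """
--     mappings = {}
--
--     # Names that are identical except for specific patterns
--     transformations = [
--         (".gamma", ".weight"),  # BatchNorm conversion
--         (".beta", ".bias"),     # BatchNorm conversion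
--         ("weight_v", "weight"), # Attention naming
--         ("weight_ih_l0_reverse", "Wx_backward"), # LSTM naming
--         ("weight_hh_l0_reverse", "Wh_backward"), # LSTM naming
--         ("bias_ih_l0_reverse", "bias_ih_backward"), # LSTM naming
--         ("bias_hh_l0_reverse", "bias_hh_backward"), # LSTM naming
--         ("weight_ih_l0", "Wx_forward"), # LSTM naming
--         ("weight_hh_l0", "Wh_forward"), # LSTM naming
--         ("bias_ih_l0", "bias_ih_forward"), # LSTM naming
--         ("bias_hh_l0", "bias_hh_forward"), # LSTM naming
--     ]
--
--     # For each expected parameter name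
--     for param_name in param_names:
--         candidates = []
--
--         # Check if it directly exists in weights
--         if param_name in weight_names:
--             candidates.append(param_name)
--
--         # Try pattern transformations
--         for old_pattern, new_pattern in transformations:
--             if old_pattern in param_name:
--                 transformed_name = param_name.replace(old_pattern, new_pattern)
--                 if transformed_name in weight_names:
--                     candidates.append(transformed_name)
--             # Try the reverse direction
--             if new_pattern in param_name:
--                 transformed_name = param_name.replace(new_pattern, old_pattern)
--                 if transformed_name in weight_names:
--                     candidates.append(transformed_name)
--
--         # Try suffix-only matching (often helpful with frameworks differences)
--         param_suffix = param_name.split('.')[-1]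
--         for weight_name in weight_names:
--             weight_suffix = weight_name.split('.')[-1]
--             if param_suffix == weight_suffix and weight_name not in candidates:
--                 candidates.append(weight_name)
--
--         if candidates:
--             mappings[param_name] = candidates
--
--     return mappings
-- ===== SOURCE B (Python) =====
-- def find_potential_mappings(param_names, weight_names):
--     """Same mapping as A, computed differently: a membership set and a
--     suffix->weight-names index are built once over weight_names, each (first
--     occurrence of a) parameter gets its candidate list from a comprehension over
--     the transformation table plus a dedup-extend from the index, and the result
--     is assembled as a list of pairs turned into a dict at the end."""
--     transformations = [
--         (".gamma", ".weight"),
--         (".beta", ".bias"),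
--         ("weight_v", "weight"),
--         ("weight_ih_l0_reverse", "Wx_backward"),
--         ("weight_hh_l0_reverse", "Wh_backward"),
--         ("bias_ih_l0_reverse", "bias_ih_backward"),
--         ("bias_hh_l0_reverse", "bias_hh_backward"),
--         ("weight_ih_l0", "Wx_forward"),
--         ("weight_hh_l0", "Wh_forward"),
--         ("bias_ih_l0", "bias_ih_forward"),
--         ("bias_hh_l0", "bias_hh_forward"),
--     ]
--     wset = set(weight_names)
--     by_suffix = {}
--     for w in weight_names:
--         by_suffix.setdefault(w.rsplit('.', 1)[-1], []).append(w)
--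
--     def dedup_extend(cand, ws):
--         for w in ws:
--             if w not in cand:
--                 cand = cand + [w]
--         return cand
--
--     def candidates(p):
--         head = ([p] if p in wset else []) + [
--             t
--             for old, new in transformations
--             for t in (([p.replace(old, new)] if old in p else [])
--                       + ([p.replace(new, old)] if new in p else []))
--             if t in wset
--         ]
--         return dedup_extend(head, by_suffix.get(p.rsplit('.', 1)[-1], []))
--
--     result = []
--     seen = set()
--     for p in param_names:
--         if p not in seen:
--             seen.add(p)
--             c = candidates(p)
--             if c:
--                 result.append((p, c))
--     return dict(result)
-- ===== Notes on version B (the rewrite author's own statement) =====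
-- stated objective: faster
-- what changed: B precomputes a membership set and a suffix->weight-names index over weight_names once and derives each parameter's candidates from a comprehension over the transformation table plus a dedup-extend from that index, assembling the output as a list of pairs over first occurrences of parameters instead of A's per-parameter rescan of all weight names into a dict.
import Mathlib
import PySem

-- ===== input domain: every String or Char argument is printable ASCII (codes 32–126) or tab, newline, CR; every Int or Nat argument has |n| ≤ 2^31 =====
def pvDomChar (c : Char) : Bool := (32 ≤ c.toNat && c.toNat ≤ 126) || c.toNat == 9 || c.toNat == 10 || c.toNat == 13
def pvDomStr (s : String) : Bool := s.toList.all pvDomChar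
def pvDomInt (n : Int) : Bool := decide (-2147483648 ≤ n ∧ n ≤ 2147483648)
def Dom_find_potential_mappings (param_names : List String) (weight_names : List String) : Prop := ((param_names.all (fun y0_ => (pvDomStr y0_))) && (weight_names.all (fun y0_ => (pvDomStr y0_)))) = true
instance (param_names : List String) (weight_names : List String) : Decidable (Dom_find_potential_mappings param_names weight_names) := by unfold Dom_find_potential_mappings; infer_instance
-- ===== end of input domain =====

-- B precomputes a membership set and a suffix → weight-names index once and builds the
-- result as a list of pairs over first occurrences of parameters (objective: faster).

-- the fixed transformation table (shared data of both Pythons)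
def pvTransformations : List (String × String) :=
  [(".gamma", ".weight"),
   (".beta", ".bias"),
   ("weight_v", "weight"),
   ("weight_ih_l0_reverse", "Wx_backward"),
   ("weight_hh_l0_reverse", "Wh_backward"),
   ("bias_ih_l0_reverse", "bias_ih_backward"),
   ("bias_hh_l0_reverse", "bias_hh_backward"),
   ("weight_ih_l0", "Wx_forward"),
   ("weight_hh_l0", "Wh_forward"),
   ("bias_ih_l0", "bias_ih_forward"),
   ("bias_hh_l0", "bias_hh_forward")]

-- name.split('.')[-1] (= name.rsplit('.', 1)[-1]; split on '.' is never empty, so [-1] never raises)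
def pvSuffix (s : String) : String :=
  PySem.List.pyGetD ((PySem.Str.split? s ".").getD []) (-1) ""

-- ===== PORT A =====
def find_potential_mappings (param_names : List String) (weight_names : List String) : List (String × List String) :=
  (param_names.foldl (fun (m : PySem.Dict String (List String)) p =>
    let c0 : List String := if weight_names.contains p then [p] else []
    let c1 := pvTransformations.foldl (fun c tr =>
      let c' :=
        if PySem.Str.isIn tr.1 p then
          (let t := PySem.Str.replace p tr.1 tr.2
           if weight_names.contains t then c ++ [t] else c)
        else c
      if PySem.Str.isIn tr.2 p then
        (let t := PySem.Str.replace p tr.2 tr.1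
         if weight_names.contains t then c' ++ [t] else c')
      else c') c0
    let sfx := pvSuffix p
    let c2 := weight_names.foldl (fun c w =>
      if pvSuffix w == sfx && !c.contains w then c ++ [w] else c) c1
    if c2 = [] then m else m.insert p c2) PySem.Dict.empty).items

-- ===== PORT B =====
-- the comprehension over the transformation table, filtered by membership in set(weight_names)
def pvSwapCandidates (inW : String → Bool) (p : String) : List String :=
  (pvTransformations.flatMap (fun tr =>
    (if PySem.Str.isIn tr.1 p then [PySem.Str.replace p tr.1 tr.2] else []) ++
    (if PySem.Str.isIn tr.2 p then [PySem.Str.replace p tr.2 tr.1] else []))).filter inW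

-- dedup_extend: append each w not already present
def pvDedupExtend (cand : List String) : List String → List String
  | [] => cand
  | w :: ws => pvDedupExtend (if cand.contains w then cand else cand ++ [w]) ws

-- the main loop: first occurrence of each parameter emits its (nonempty) candidate list
def pvEmit (cand : String → List String) : List String → PySem.Set String → List (String × List String)
  | [], _ => []
  | p :: ps, seen =>
    if PySem.Set.contains seen p then pvEmit cand ps seen
    else
      let c := cand p
      if c = [] then pvEmit cand ps (PySem.Set.add seen p)
      else (p, c) :: pvEmit cand ps (PySem.Set.add seen p)

def find_potential_mappings_alt (param_names : List String) (weight_names : List String) : List (String × List String) :=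
  let wset := PySem.Set.ofList weight_names
  let bySuffix := weight_names.foldl
    (fun (d : PySem.Dict String (List String)) w => d.modify (pvSuffix w) [] (· ++ [w]))
    PySem.Dict.empty
  pvEmit (fun p =>
      pvDedupExtend
        ((if PySem.Set.contains wset p then [p] else []) ++ pvSwapCandidates (PySem.Set.contains wset) p)
        (bySuffix.getD (pvSuffix p) []))
    param_names PySem.Set.empty

-- ===== PRECONDITION & SPEC =====
def Spec_find_potential_mappings (param_names : List String) (weight_names : List String) (out : List (String × List String)) : Prop := out = find_potential_mappings_alt param_names weight_names
instance (param_names : List String) (weight_names : List String) (out : List (String × List String)) : Decidable (Spec_find_potential_mappings param_names weight_names out) := by unfold Spec_find_potential_mappings; infer_instance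

-- ===== CLAIM (what is proved, stated in full; the proofs are below) =====
def Claim_equal_find_potential_mappings : Prop := ∀ (param_names : List String) (weight_names : List String), Dom_find_potential_mappings param_names weight_names → Spec_find_potential_mappings param_names weight_names (find_potential_mappings param_names weight_names)

-- ===== LEMMAS AND PROOFS =====

-- A's candidate list for one parameter, factored out of A's fold step
def pvCandA (weight_names : List String) (p : String) : List String :=
  weight_names.foldl (fun c w =>
    if pvSuffix w == pvSuffix p && !c.contains w then c ++ [w] else c)
    (pvTransformations.foldl (fun c tr =>
      let c' :=
        if PySem.Str.isIn tr.1 p then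
          (let t := PySem.Str.replace p tr.1 tr.2
           if weight_names.contains t then c ++ [t] else c)
        else c
      if PySem.Str.isIn tr.2 p then
        (let t := PySem.Str.replace p tr.2 tr.1
         if weight_names.contains t then c' ++ [t] else c')
      else c')
      (if weight_names.contains p then [p] else []))

theorem pv_A_eq (pn wn : List String) :
    find_potential_mappings pn wn
      = (pn.foldl (fun (m : PySem.Dict String (List String)) p =>
          if pvCandA wn p = [] then m else m.insert p (pvCandA wn p)) PySem.Dict.empty).items := rfl

theorem pv_set_contains (ws : List String) (x : String) :
    PySem.Set.contains (PySem.Set.ofList ws) x = ws.contains x := by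
  simp [PySem.Set.contains_eq_listContains, PySem.Set.mem_ofList]

-- A's transformation fold is the seed list followed by B's filtered comprehension
theorem pv_trans_fold (inW : String → Bool) (p : String) (trs : List (String × String)) (c0 : List String) :
    trs.foldl (fun c tr =>
      let c' :=
        if PySem.Str.isIn tr.1 p then
          (let t := PySem.Str.replace p tr.1 tr.2
           if inW t then c ++ [t] else c)
        else c
      if PySem.Str.isIn tr.2 p then
        (let t := PySem.Str.replace p tr.2 tr.1
         if inW t then c' ++ [t] else c')
      else c') c0
      = c0 ++ (trs.flatMap (fun tr =>
          (if PySem.Str.isIn tr.1 p then [PySem.Str.replace p tr.1 tr.2] else []) ++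
          (if PySem.Str.isIn tr.2 p then [PySem.Str.replace p tr.2 tr.1] else []))).filter inW := by
  induction trs generalizing c0 with
  | nil => simp
  | cons tr t ih =>
      rw [List.foldl_cons, ih, List.flatMap_cons, List.filter_append, List.filter_append]
      by_cases h1 : PySem.Str.isIn tr.1 p <;> by_cases h2 : PySem.Str.isIn tr.2 p <;>
        simp <;> split_ifs <;> simp_all

-- the suffix index looked up at s is exactly the weights whose suffix is s
theorem pv_index_getD (ws : List String) (s : String) :
    (ws.foldl (fun (d : PySem.Dict String (List String)) w =>
        d.modify (pvSuffix w) [] (· ++ [w])) PySem.Dict.empty).getD s []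
      = ws.filter (fun w => pvSuffix w == s) := by
  have h : ws.foldl (fun (d : PySem.Dict String (List String)) w =>
        d.modify (pvSuffix w) [] (· ++ [w])) PySem.Dict.empty
      = (ws.map (fun w => (pvSuffix w, w))).foldl
          (fun d p => d.modify p.1 [] (· ++ [p.2])) PySem.Dict.empty := by
    simp [List.foldl_map]
  rw [h, PySem.Dict.getD_foldl_modify_append]
  simp [List.filter_map, List.map_map, Function.comp_def]

-- dedup-extend over the filtered weights = A's guarded fold over all weights
theorem pv_dedup_fold (q : String → Bool) (ws : List String) (c : List String) :
    pvDedupExtend c (ws.filter q)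
      = ws.foldl (fun c w => if q w && !c.contains w then c ++ [w] else c) c := by
  induction ws generalizing c with
  | nil => rfl
  | cons w t ih =>
      by_cases hw : q w
      · simp only [List.filter_cons, hw, if_pos, List.foldl_cons, pvDedupExtend, Bool.true_and]
        by_cases hc : w ∈ c
        · simpa [hc] using ih c
        · simpa [hc] using ih (c ++ [w])
      · simp only [List.filter_cons, hw, List.foldl_cons, Bool.false_and,
          Bool.false_eq_true, not_false_eq_true, if_neg]
        exact ih _

-- the two candidate functions agree
theorem pv_cand_eq (wn : List String) (p : String) :
    pvDedupExtend
        ((if PySem.Set.contains (PySem.Set.ofList wn) p then [p] else []) ++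
          pvSwapCandidates (PySem.Set.contains (PySem.Set.ofList wn)) p)
        ((wn.foldl (fun (d : PySem.Dict String (List String)) w =>
            d.modify (pvSuffix w) [] (· ++ [w])) PySem.Dict.empty).getD (pvSuffix p) [])
      = pvCandA wn p := by
  have hfun : PySem.Set.contains (PySem.Set.ofList wn) = wn.contains := by
    funext x; exact pv_set_contains wn x
  unfold pvCandA pvSwapCandidates
  rw [pv_index_getD, pv_dedup_fold, hfun, pv_trans_fold]

-- a fold of key-determined inserts, read back as items, is pvEmit
theorem pv_fold_items (f : String → List String) (ps : List String)
    (m : PySem.Dict String (List String)) (seen : List String)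
    (hnd : m.keys.Nodup)
    (hval : ∀ q ∈ m.items, q.2 = f q.1)
    (hsub : ∀ k ∈ m.keys, k ∈ seen)
    (hext : ∀ k ∈ seen, k ∉ m.keys → f k = []) :
    (ps.foldl (fun m p => if f p = [] then m else m.insert p (f p)) m).items
      = m.items ++ pvEmit f ps seen := by
  induction ps generalizing m seen with
  | nil => simp [pvEmit]
  | cons p t ih =>
      rw [List.foldl_cons]
      by_cases hseen : p ∈ seen
      · have hcs : PySem.Set.contains seen p = true := by
          simp [PySem.Set.contains_eq_listContains, hseen]
        by_cases hf : f p = []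
        · rw [if_pos hf]
          have hE : pvEmit f (p :: t) seen = pvEmit f t seen := by simp [pvEmit, hseen]
          rw [hE]
          exact ih m seen hnd hval hsub hext
        · -- p already seen and f p ≠ [] ⇒ p is a key of m and the insert is a no-op
          have hkey : p ∈ m.keys := by
            by_contra hk
            exact hf (hext p hseen hk)
          have hcontains : m.contains p = true := (PySem.Dict.contains_iff_mem_keys m p).mpr hkey
          have hins : m.insert p (f p) = m := by
            apply PySem.Dict.ext
            rw [PySem.Dict.items_insert_of_contains m (f p) hcontains]
            have hid : ∀ q ∈ m.items,
                (if (q.1 == p) = true then (p, f p) else q) = id q := by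
              intro q hq
              by_cases he : q.1 == p
              · have hq1 : q.1 = p := by simpa using he
                have hq2 : q = (p, f p) := by
                  have := hval q hq
                  cases q with
                  | mk a b => simp only at hq1 this; subst hq1; simp [this]
                simp [hq2]
              · simp [he]
            rw [List.map_congr_left hid, List.map_id]
          rw [if_neg hf, hins]
          have hE : pvEmit f (p :: t) seen = pvEmit f t seen := by simp [pvEmit, hseen]
          rw [hE]
          exact ih m seen hnd hval hsub hext
      · have hcs : PySem.Set.contains seen p = false := by
          simp [PySem.Set.contains_eq_listContains, hseen]
        have hnk : p ∉ m.keys := fun hk => hseen (hsub p hk)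
        have hadd : PySem.Set.add seen p = seen ++ [p] := by
          simp [PySem.Set.add, PySem.Set.contains_eq_listContains, hseen]
        by_cases hf : f p = []
        · rw [if_pos hf]
          have hE : pvEmit f (p :: t) seen = pvEmit f t (seen ++ [p]) := by
            simp [pvEmit, hseen, hf]
          rw [hE]
          refine ih m (seen ++ [p]) hnd hval (fun k hk => List.mem_append_left _ (hsub k hk)) ?_
          intro k hk hkm
          rcases List.mem_append.1 hk with h | h
          · exact hext k h hkm
          · simp at h; subst h; exact hf
        · have hcontains : m.contains p = false := by
            rw [← Bool.not_eq_true]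
            intro hc
            exact hnk ((PySem.Dict.contains_iff_mem_keys m p).mp hc)
          have hE : pvEmit f (p :: t) seen = (p, f p) :: pvEmit f t (seen ++ [p]) := by
            simp [pvEmit, hseen, hf]
          have h1 : (m.insert p (f p)).keys.Nodup := by
            rw [PySem.Dict.keys_insert_of_not_contains m (f p) hcontains, List.nodup_append]
            refine ⟨hnd, List.nodup_singleton p, ?_⟩
            intro a ha b hb hab
            rw [List.mem_singleton] at hb
            exact hnk ((hab.trans hb) ▸ ha)
          have h2 : ∀ q ∈ (m.insert p (f p)).items, q.2 = f q.1 := by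
            intro q hq
            rw [PySem.Dict.items_insert_of_not_contains m (f p) hcontains] at hq
            rcases List.mem_append.1 hq with h | h
            · exact hval q h
            · simp at h; subst h; rfl
          have h3 : ∀ k ∈ (m.insert p (f p)).keys, k ∈ seen ++ [p] := by
            intro k hk
            rw [PySem.Dict.keys_insert_of_not_contains m (f p) hcontains] at hk
            rcases List.mem_append.1 hk with h | h
            · exact List.mem_append_left _ (hsub k h)
            · exact List.mem_append_right _ h
          have h4 : ∀ k ∈ seen ++ [p], k ∉ (m.insert p (f p)).keys → f k = [] := by
            intro k hk hkm
            rw [PySem.Dict.keys_insert_of_not_contains m (f p) hcontains] at hkm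
            rcases List.mem_append.1 hk with h | h
            · exact hext k h (fun hm => hkm (List.mem_append_left _ hm))
            · simp at h; subst h
              exact absurd (List.mem_append_right _ (by simp)) hkm
          rw [if_neg hf, hE, ih (m.insert p (f p)) (seen ++ [p]) h1 h2 h3 h4,
            PySem.Dict.items_insert_of_not_contains m (f p) hcontains]
          simp

-- ===== VERDICT (by name: the statement is the Claim_ definition above) =====
theorem find_potential_mappings_spec : Claim_equal_find_potential_mappings := by
  intro pn wn _
  unfold Spec_find_potential_mappings
  have hB : find_potential_mappings_alt pn wn = pvEmit (pvCandA wn) pn [] := by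
    have h0 : find_potential_mappings_alt pn wn
        = pvEmit (fun p =>
            pvDedupExtend
              ((if PySem.Set.contains (PySem.Set.ofList wn) p then [p] else []) ++
                pvSwapCandidates (PySem.Set.contains (PySem.Set.ofList wn)) p)
              ((wn.foldl (fun (d : PySem.Dict String (List String)) w =>
                  d.modify (pvSuffix w) [] (· ++ [w])) PySem.Dict.empty).getD (pvSuffix p) []))
            pn [] := rfl
    rw [h0]
    congr 1
    funext p
    exact pv_cand_eq wn p
  rw [pv_A_eq, hB]
  have h := pv_fold_items (pvCandA wn) pn PySem.Dict.empty []
    List.nodup_nil (fun q hq => nomatch hq) (fun k hk => nomatch hk) (fun k hk _ => nomatch hk)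
  simpa using h
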